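-- pv_equiv track=rewrite | github.com/KaliBasenji42/Raspi-Log | log.py | strToArray
-- ===== SOURCE A (Python) =====
-- def strToArray(string):
--
--   out = []
--
--   var = ''
--
--   div = ' '
--
--   string = string + div
--
--   for i in range(len(string)):
--
--     if string[i-len(div):i] == div:
--
--       var = var[:-len(div)]
--
--       out.append(var)
--
--       var = ''
--
--
--     var += string[i]
--
--
--   var = var[:-len(div)]
--
--   out.append(var)
--
--   return out
-- ===== SOURCE B (Python) =====
-- def strToArray(string):
--   i = string.find(' ')
--   if i == -1:
--     return [string]
--   return [string[:i]] + strToArray(string[i + 1:])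
-- ===== Notes on version B (the rewrite author's own statement) =====
-- stated objective: simpler
-- what changed: Replaced the per-character accumulator loop over the space-padded string (with per-iteration self-slicing to detect the previous delimiter) by a short recursion that locates each space with str.find and slices each field out directly, doing the scanning inside the C-level find/slice primitives.
import Mathlib
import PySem

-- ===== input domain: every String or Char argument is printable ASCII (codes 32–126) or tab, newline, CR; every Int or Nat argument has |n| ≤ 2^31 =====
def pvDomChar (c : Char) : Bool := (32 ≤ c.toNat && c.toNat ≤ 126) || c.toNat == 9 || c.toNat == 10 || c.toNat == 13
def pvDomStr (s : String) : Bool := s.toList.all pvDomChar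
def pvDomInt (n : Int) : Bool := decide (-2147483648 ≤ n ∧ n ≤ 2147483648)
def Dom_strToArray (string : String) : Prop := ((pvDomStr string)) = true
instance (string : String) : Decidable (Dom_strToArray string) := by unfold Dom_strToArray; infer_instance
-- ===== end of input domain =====

-- B replaces A's per-character accumulator loop over the space-padded string (which detects the
-- previous delimiter by slicing the string against itself) with a short recursion that locates
-- each space via str.find and slices the field out directly; same return value (simpler).

-- ===== PORT A =====
-- one iteration of A's 'for i in range(len(string))' loop (state = (out, var))
def aStep (s : List Char) (st : List String × List Char) (i : Int) : List String × List Char :=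
  let div : List Char := [' ']
  let st' :=
    if PySem.List.slice s (some (i - (div.length : Int))) (some i) = div then
      (st.1 ++ [String.ofList (PySem.List.slice st.2 none (some (-(div.length : Int))))],
       ([] : List Char))
    else st
  (st'.1, st'.2 ++ [PySem.List.pyGetD s i ' '])

def strToArray (string : String) : List String :=
  let div : List Char := [' ']
  let s := string.toList ++ div
  let fin := (PySem.List.pyRange 0 (s.length : Int)).foldl (aStep s) ([], [])
  fin.1 ++ [String.ofList (PySem.List.slice fin.2 none (some (-(div.length : Int))))]

-- ===== PORT B =====
-- termination helper for the recursion in altGo: a successful find is a valid index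
theorem find_pos (cs : List Char) (h : PySem.Chars.find cs [' '] ≠ -1) :
    0 ≤ PySem.Chars.find cs [' '] ∧ (PySem.Chars.find cs [' ']).toNat < cs.length := by
  have hs := PySem.Chars.findFrom_natCast_spec cs [' '] 0 (Nat.zero_le _)
  rw [Nat.cast_zero, PySem.Chars.findFrom_zero] at hs
  obtain ⟨h0, hpre, -⟩ := hs h
  refine ⟨h0, ?_⟩
  rcases List.cons_prefix_iff.1 hpre with ⟨l', hl', -⟩
  by_contra hlen
  have : List.drop (PySem.Chars.find cs [' ']).toNat cs = [] :=
    List.drop_eq_nil_of_le (by omega)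
  simp [this] at hl'

def strToArray_alt (string : String) : List String := altGo string.toList
where
  altGo (cs : List Char) : List String :=
    if h : PySem.Chars.find cs [' '] = -1 then [String.ofList cs]
    else
      let i := PySem.Chars.find cs [' ']
      String.ofList (PySem.List.slice cs none (some i)) ::
        altGo (PySem.List.slice cs (some (i + 1)) none)
  termination_by cs.length
  decreasing_by
    obtain ⟨h0, hlt⟩ := find_pos cs h
    rw [PySem.List.slice_from cs (by omega : (0:Int) ≤ PySem.Chars.find cs [' '] + 1)]
    simp only [List.length_drop]
    omega

-- ===== PRECONDITION & SPEC =====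
def Spec_strToArray (string : String) (out : List String) : Prop := out = strToArray_alt string
instance (string : String) (out : List String) : Decidable (Spec_strToArray string out) := by unfold Spec_strToArray; infer_instance

-- ===== CLAIM (what is proved, stated in full; the proofs are below) =====
def Claim_equal_strToArray : Prop := ∀ (string : String), Dom_strToArray string → Spec_strToArray string (strToArray string)

-- ===== LEMMAS AND PROOFS =====

-- reference: Python's s.split(' ') on the character list
def rSplit : List Char → List (List Char)
  | [] => [[]]
  | c :: cs => if c = ' ' then [] :: rSplit cs else (rSplit cs).modifyHead (c :: ·)

theorem rSplit_no_space (cs : List Char) (h : ' ' ∉ cs) : rSplit cs = [cs] := by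
  induction cs with
  | nil => rfl
  | cons c cs ih =>
    simp only [List.mem_cons, not_or] at h
    simp [rSplit, Ne.symm h.1, ih h.2]

theorem rSplit_append (pre rest : List Char) (h : ' ' ∉ pre) :
    rSplit (pre ++ ' ' :: rest) = pre :: rSplit rest := by
  induction pre with
  | nil => simp [rSplit]
  | cons c pre ih =>
    simp only [List.mem_cons, not_or] at h
    simp [rSplit, Ne.symm h.1, ih h.2]

-- ---- B equals rSplit ----

theorem singleton_prefix_drop (cs : List Char) (j : Nat) (hj : j < cs.length) :
    ([' '] <+: cs.drop j) ↔ cs[j] = ' ' := by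
  rw [List.drop_eq_getElem_cons hj, List.cons_prefix_iff]
  constructor
  · rintro ⟨l', hl', -⟩
    exact ((List.cons.injEq _ _ _ _ ▸ hl').1).symm ▸ rfl
  · intro hc
    exact ⟨_, by rw [hc], List.nil_prefix⟩

theorem altGo_eq_rSplit (cs : List Char) :
    strToArray_alt.altGo cs = (rSplit cs).map String.ofList := by
  induction cs using strToArray_alt.altGo.induct with
  | case1 cs h =>
    rw [strToArray_alt.altGo, dif_pos h]
    rw [PySem.Chars.find_eq_neg_one_iff] at h
    have hns : ' ' ∉ cs := fun hm => h (by
      rcases List.mem_iff_append.1 hm with ⟨s, t, hst⟩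
      exact ⟨s, t, by simp [hst]⟩)
    simp [rSplit_no_space cs hns]
  | case2 cs h i ih =>
    rw [strToArray_alt.altGo, dif_neg h]
    obtain ⟨h0, hlt⟩ := find_pos cs h
    have hs := PySem.Chars.findFrom_natCast_spec cs [' '] 0 (Nat.zero_le _)
    rw [Nat.cast_zero, PySem.Chars.findFrom_zero] at hs
    obtain ⟨-, hpre, hmin⟩ := hs h
    set t := (PySem.Chars.find cs [' ']).toNat with ht
    have hcsj : cs[t]'hlt = ' ' := (singleton_prefix_drop cs t hlt).1 hpre
    have hdrop : cs.drop t = ' ' :: cs.drop (t + 1) := by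
      rw [List.drop_eq_getElem_cons hlt, hcsj]
    have hnpre : ' ' ∉ cs.take t := by
      intro hm
      rcases List.mem_take_iff_getElem.1 hm with ⟨j, hj, hje⟩
      have hjt : j < t := by omega
      have hjlen : j < cs.length := by omega
      exact hmin j (Nat.zero_le _) hjt ((singleton_prefix_drop cs j hjlen).2 hje)
    have hslice1 : PySem.List.slice cs none (some (PySem.Chars.find cs [' '])) = cs.take t := by
      rw [PySem.List.slice_to cs h0]
    have hslice2 : PySem.List.slice cs (some (PySem.Chars.find cs [' '] + 1))
        = cs.drop (t + 1) := by
      rw [PySem.List.slice_from cs (by omega : (0:Int) ≤ PySem.Chars.find cs [' '] + 1)]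
      congr 1
      omega
    have hcseq : cs = cs.take t ++ ' ' :: cs.drop (t + 1) := by
      conv_lhs => rw [← List.take_append_drop t cs]
      rw [hdrop]
    have hr : rSplit cs = cs.take t :: rSplit (cs.drop (t + 1)) := by
      conv_lhs => rw [hcseq]
      exact rSplit_append _ _ hnpre
    rw [hslice2] at ih
    show String.ofList (PySem.List.slice cs none (some (PySem.Chars.find cs [' ']))) ::
        strToArray_alt.altGo (PySem.List.slice cs (some (PySem.Chars.find cs [' '] + 1)))
      = (rSplit cs).map String.ofList
    rw [hslice1, hslice2, ih, hr, List.map_cons]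

-- ---- A equals rSplit ----

-- A's loop, reformulated by structural recursion carrying the previous character
def aGo (prev : Char) : List Char → List String × List Char → List String × List Char
  | [], st => st
  | c :: rest, st =>
      aGo c rest
        (if prev = ' ' then (st.1 ++ [String.ofList st.2.dropLast], [c])
         else (st.1, st.2 ++ [c]))

def aFinish (st : List String × List Char) : List String :=
  st.1 ++ [String.ofList st.2.dropLast]

theorem aStep_eq (s : List Char) (j : Nat) (hj1 : 1 ≤ j) (hj : j < s.length)
    (st : List String × List Char) :
    aStep s st (j : Int) =
      (if s[j-1]'(by omega) = ' ' then (st.1 ++ [String.ofList st.2.dropLast], [s[j]'hj])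
       else (st.1, st.2 ++ [s[j]'hj])) := by
  have hslice : PySem.List.slice s (some ((j : Int) - 1)) (some (j : Int))
      = [s[j-1]'(by omega)] := by
    have hc : (j : Int) - 1 = ((j - 1 : Nat) : Int) := by omega
    rw [hc, PySem.List.slice_natCast, List.drop_eq_getElem_cons (by omega : j - 1 < s.length)]
    have h1 : j - (j - 1) = 1 := by omega
    rw [h1]
    simp [Nat.sub_add_cancel hj1]
  unfold aStep
  simp only [List.length_cons, List.length_nil, Nat.zero_add, Nat.cast_one, hslice,
    PySem.List.slice_to_neg_one, PySem.List.pyGetD_ofNat s j ' ' hj]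
  by_cases hsp : s[j-1]'(by omega) = ' '
  · simp [hsp]
  · simp [hsp]

theorem foldl_aStep (s : List Char) (j : Nat) (hj1 : 1 ≤ j) (hj : j ≤ s.length)
    (st : List String × List Char) :
    (PySem.List.pyRange (j : Int) (s.length : Int)).foldl (aStep s) st
      = aGo (s[j-1]'(by omega)) (s.drop j) st := by
  induction hn : s.length - j generalizing j st with
  | zero =>
    have hjl : j = s.length := by omega
    have hempty : PySem.List.pyRange (j : Int) (s.length : Int) = [] := by
      rw [PySem.List.pyRange_one]
      have : ((s.length : Int) - j).toNat = 0 := by omega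
      simp [this]
    rw [hempty, List.drop_eq_nil_of_le (by omega)]
    rfl
  | succ n ih =>
    have hjlt : j < s.length := by omega
    rw [PySem.List.pyRange_one_cons (by exact_mod_cast hjlt), List.foldl_cons,
      aStep_eq s j hj1 hjlt st,
      show ((j : Int) + 1) = ((j + 1 : Nat) : Int) by push_cast; ring,
      ih (j + 1) (by omega) (by omega) _ (by omega),
      List.drop_eq_getElem_cons hjlt]
    show aGo (s[(j+1)-1]'(by omega)) (s.drop (j+1)) _
      = aGo s[j] (s.drop (j + 1)) _
    simp only [Nat.add_sub_cancel]

theorem aGo_spec (mid : List Char) :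
    ∀ (prev : Char) (out : List String) (seg : List Char),
      aFinish (aGo prev (mid ++ [' ']) (out, seg ++ [prev]))
        = out ++ ((rSplit (prev :: mid)).modifyHead (seg ++ ·)).map String.ofList := by
  induction mid with
  | nil =>
    intro prev out seg
    by_cases hp : prev = ' '
    · subst hp; simp [aGo, aFinish, rSplit]
    · simp [aGo, hp, aFinish, rSplit]
  | cons c mid ih =>
    intro prev out seg
    by_cases hp : prev = ' '
    · subst hp
      have h2 := ih c (out ++ [String.ofList seg]) []
      simp only [List.nil_append] at h2
      simp [aGo, h2, rSplit]
      rw [show (fun x : List Char => x) = id from rfl, List.modifyHead_id]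
      rfl
    · have h2 := ih c out (seg ++ [prev])
      simp only [List.cons_append, aGo, if_neg hp, h2]
      conv_rhs => rw [rSplit]
      rw [if_neg hp, List.modifyHead_modifyHead]
      have hfe : ((fun x => seg ++ x) ∘ fun x => prev :: x) = (fun x => seg ++ [prev] ++ x) := by
        funext x; simp
      rw [hfe]

theorem strToArray_list (cs : List Char) :
    ((PySem.List.pyRange 0 (((cs ++ [' ']).length : Nat) : Int)).foldl (aStep (cs ++ [' '])) ([], [])).1
      ++ [String.ofList (PySem.List.slice
            ((PySem.List.pyRange 0 (((cs ++ [' ']).length : Nat) : Int)).foldl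
              (aStep (cs ++ [' '])) ([], [])).2 none (some (-1)))]
    = (rSplit cs).map String.ofList := by
  set s := cs ++ [' '] with hs
  have h0 : 0 < s.length := by simp [hs]
  have hsl : PySem.List.slice s (some (-1)) (some 0) = [] := by
    apply List.eq_nil_of_length_eq_zero
    rw [PySem.List.length_slice]
    simp [PySem.List.clampIdx]
  have hget0 : PySem.List.pyGetD s 0 ' ' = s[0]'h0 := by
    have := PySem.List.pyGetD_ofNat s 0 ' ' h0
    simpa using this
  have hstep0 : aStep s ([], ([] : List Char)) 0 = ([], [s[0]'h0]) := by
    unfold aStep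
    simp [hsl, hget0]
  rw [PySem.List.pyRange_one_cons (by exact_mod_cast h0), List.foldl_cons, hstep0,
    show (0:Int) + 1 = ((1:Nat):Int) by norm_num,
    foldl_aStep s 1 le_rfl (by omega)]
  cases cs with
  | nil =>
    have hd : s.drop 1 = [] := by simp [hs]
    have hg1 : s[1-1]'(by omega) = ' ' := by simp [hs]
    rw [hd, hg1]
    simp [aGo, rSplit, PySem.List.slice_to_neg_one]
  | cons c cs' =>
    have hd : s.drop 1 = cs' ++ [' '] := by simp [hs]
    have hg1 : s[1-1]'(by omega) = c := by simp [hs]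
    rw [hd, hg1, PySem.List.slice_to_neg_one]
    have hspec := aGo_spec cs' c [] []
    simp only [List.nil_append] at hspec
    rw [show ((aGo c (cs' ++ [' ']) ([], [c])).1
        ++ [String.ofList (aGo c (cs' ++ [' ']) ([], [c])).2.dropLast])
      = aFinish (aGo c (cs' ++ [' ']) ([], [c])) from rfl, hspec]
    rw [show (fun x : List Char => x) = id from rfl, List.modifyHead_id]
    rfl

theorem strToArray_eq_rSplit (string : String) :
    strToArray string = (rSplit string.toList).map String.ofList :=
  strToArray_list string.toList

-- ===== VERDICT (by name: the statement is the Claim_ definition above) =====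
theorem strToArray_spec : Claim_equal_strToArray := by
  intro s _
  unfold Spec_strToArray
  rw [strToArray_eq_rSplit]
  show (rSplit s.toList).map String.ofList = strToArray_alt.altGo s.toList
  rw [altGo_eq_rSplit]
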